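-- pv_equiv track=rewrite | github.com/LokenathBanerjee/Medical_Assistant | utils/validators.py | is_medical_query
-- ===== SOURCE A (Python) =====
-- def is_medical_query(text: str) -> bool:
--     t = (text or "").lower().strip()
--
--     # Common symptom keywords (+ your typo "feaver")
--     medical_keywords = [
--         "fever", "feaver", "temperature", "chills",
--         "cough", "cold", "sneeze", "runny nose", "congestion",
--         "sore throat", "throat pain",
--         "headache", "migraine",
--         "body pain", "body ache", "muscle pain",
--         "vomit", "vomiting", "nausea",
--         "diarrhea", "loose motion", "loose motions",
--         "stomach pain", "abdominal pain",
--         "chest pain", "breathless", "shortness of breath",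
--         "rash", "itching",
--         "infection", "allergy", "bp", "blood pressure", "sugar", "diabetes", "asthma"
--     ]
--
--     return any(k in t for k in medical_keywords)
-- ===== SOURCE B (Python) =====
-- _PATTERN = ("fever|feaver|temperature|chills|cough|cold|sneeze|runny nose|"
--             "congestion|sore throat|throat pain|headache|migraine|body pain|"
--             "body ache|muscle pain|vomit|vomiting|nausea|diarrhea|loose motion|"
--             "loose motions|stomach pain|abdominal pain|chest pain|breathless|"
--             "shortness of breath|rash|itching|infection|allergy|bp|"
--             "blood pressure|sugar|diabetes|asthma")
--
--
-- def is_medical_query(text: str) -> bool: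
--     # Build a first-character index (dict: first char -> keywords starting with
--     # it) from a single '|'-joined pattern, then make one positional pass over
--     # the normalized text, probing only the bucket of the character seen there.
--     kws = _PATTERN.split("|")
--     index = {}
--     for k in kws:
--         key = k[:1]
--         index[key] = index.get(key, []) + [k]
--     t = (text or "").lower().strip()
--     return any(
--         t.startswith(k, i)
--         for i, c in enumerate(t)
--         for k in index.get(c, [])
--     )
-- ===== Notes on version B (the rewrite author's own statement) =====
-- stated objective: alternative
-- what changed: B keeps the keywords as one pipe-joined pattern split at call time, builds a dict indexing keywords by their first character, and makes a single positional pass over the text probing only the bucket of the character at each position, instead of A's 37 independent per-keyword substring searches.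
import Mathlib
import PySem

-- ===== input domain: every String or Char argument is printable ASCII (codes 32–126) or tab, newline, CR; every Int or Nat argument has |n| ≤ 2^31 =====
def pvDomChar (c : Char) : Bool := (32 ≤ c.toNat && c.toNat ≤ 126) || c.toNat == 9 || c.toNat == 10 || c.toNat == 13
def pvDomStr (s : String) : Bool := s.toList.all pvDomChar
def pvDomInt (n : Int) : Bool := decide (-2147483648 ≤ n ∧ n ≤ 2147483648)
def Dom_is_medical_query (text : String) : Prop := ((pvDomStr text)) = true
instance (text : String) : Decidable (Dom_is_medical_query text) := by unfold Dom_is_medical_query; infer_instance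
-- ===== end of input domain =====

-- B keeps the keywords as one '|'-joined pattern and replaces A's per-keyword substring
-- searches with a first-character bucket index probed in one positional pass over the text.

-- ===== PORT A =====
def medical_keywords : List String :=
  ["fever", "feaver", "temperature", "chills",
   "cough", "cold", "sneeze", "runny nose", "congestion",
   "sore throat", "throat pain",
   "headache", "migraine",
   "body pain", "body ache", "muscle pain",
   "vomit", "vomiting", "nausea",
   "diarrhea", "loose motion", "loose motions",
   "stomach pain", "abdominal pain",
   "chest pain", "breathless", "shortness of breath",
   "rash", "itching",
   "infection", "allergy", "bp", "blood pressure", "sugar", "diabetes", "asthma"]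

-- '(text or "")' is 'text' for every str (the only falsy str is "", which is unchanged)
def is_medical_query (text : String) : Bool :=
  let t := PySem.Str.strip (PySem.Str.lower text)
  medical_keywords.any (fun k => PySem.Str.isIn k t)

-- ===== PORT B =====
def altPattern : String :=
  "fever|feaver|temperature|chills|cough|cold|sneeze|runny nose|congestion|sore throat|throat pain|headache|migraine|body pain|body ache|muscle pain|vomit|vomiting|nausea|diarrhea|loose motion|loose motions|stomach pain|abdominal pain|chest pain|breathless|shortness of breath|rash|itching|infection|allergy|bp|blood pressure|sugar|diabetes|asthma"

-- Source B's index-building loop: dict from k[:1] to the keywords starting with it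
def altIndex (kws : List (List Char)) : PySem.Dict (List Char) (List (List Char)) :=
  kws.foldl (fun d k => d.modify (k.take 1) [] (· ++ [k])) PySem.Dict.empty

-- the generator: for (i, c) in enumerate(t), for k in index.get(c, []), t.startswith(k, i);
-- p.1 from 'enumerate t 0' is ≥ 0, so '.toNat' is exact and 't.startswith(k, i)' is a prefix test on 't.drop i'
def is_medical_query_alt (text : String) : Bool :=
  let kws := PySem.Chars.splitOn altPattern.toList ['|']
  let idx := altIndex kws
  let t := PySem.Chars.strip (PySem.Chars.lower text.toList)
  (PySem.List.enumerate t 0).any (fun p =>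
    (idx.getD [p.2] []).any (fun k => PySem.Chars.startswith (t.drop p.1.toNat) k))

-- ===== PRECONDITION & SPEC =====
def Spec_is_medical_query (text : String) (out : Bool) : Prop := out = is_medical_query_alt text
instance (text : String) (out : Bool) : Decidable (Spec_is_medical_query text out) := by unfold Spec_is_medical_query; infer_instance

-- ===== CLAIM =====
def Claim_equal_is_medical_query : Prop := ∀ (text : String), Dom_is_medical_query text → Spec_is_medical_query text (is_medical_query text)

-- ===== LEMMAS AND PROOFS =====

-- the bucket of key c holds exactly the keywords whose first character is c, in order
theorem altIndex_getD (kws : List (List Char)) (c : List Char) :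
    (altIndex kws).getD c [] = kws.filter (fun k => k.take 1 == c) := by
  have h : altIndex kws
      = (kws.map (fun k => (k.take 1, k))).foldl
          (fun d p => d.modify p.1 [] (· ++ [p.2])) PySem.Dict.empty := by
    unfold altIndex
    rw [List.foldl_map]
  rw [h, PySem.Dict.getD_foldl_modify_append]
  rw [List.filter_map, List.map_map]
  simp [Function.comp_def]

-- the bucketed positional scan finds exactly the keywords occurring as substrings
theorem scan_eq (kws : List (List Char)) (hne : ∀ k ∈ kws, k ≠ []) (t : List Char) :
    ((PySem.List.enumerate t 0).any (fun p =>
        ((altIndex kws).getD [p.2] []).any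
          (fun k => PySem.Chars.startswith (t.drop p.1.toNat) k)))
      = kws.any (fun k => PySem.Chars.isIn k t) := by
  rw [Bool.eq_iff_iff]
  simp only [List.any_eq_true, altIndex_getD, List.mem_filter,
    PySem.Chars.startswith_iff, PySem.List.mem_enumerate_iff]
  constructor
  · rintro ⟨p, ⟨j, hj, rfl⟩, k, ⟨hk, _⟩, hpre⟩
    refine ⟨k, hk, (PySem.Chars.exists_prefix_drop_iff_isIn k t).1 ⟨j, ?_⟩⟩
    simpa using hpre
  · rintro ⟨k, hk, hin⟩
    obtain ⟨j, hpre⟩ := (PySem.Chars.exists_prefix_drop_iff_isIn k t).2 hin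
    have hkne := hne k hk
    have hj : j < t.length := by
      by_contra h
      have hnil : t.drop j = [] := List.drop_eq_nil_of_le (Nat.le_of_not_lt h)
      exact hkne (List.prefix_nil.mp (hnil ▸ hpre))
    obtain ⟨c0, k', rfl⟩ : ∃ c0 k', k = c0 :: k' := by
      cases k with
      | nil => exact absurd rfl hkne
      | cons a b => exact ⟨a, b, rfl⟩
    have hdrop : t.drop j = t[j] :: t.drop (j + 1) := (List.getElem_cons_drop hj).symm
    have hc0 : c0 = t[j] := by
      have h := hpre
      rw [hdrop] at h
      exact (List.cons_prefix_cons.mp h).1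
    refine ⟨(0 + (j : Int), t[j]), ⟨j, hj, rfl⟩, c0 :: k', ⟨hk, by simp [hc0]⟩, ?_⟩
    simpa using hpre

set_option maxRecDepth 4096 in
theorem altKeywords_eq :
    PySem.Chars.splitOn altPattern.toList ['|'] = medical_keywords.map String.toList := by
  decide

theorem keywords_ne_nil : ∀ k ∈ medical_keywords.map String.toList, k ≠ [] := by
  decide

-- ===== VERDICT =====
theorem is_medical_query_spec : Claim_equal_is_medical_query := by
  intro text _
  unfold Spec_is_medical_query
  show is_medical_query text = is_medical_query_alt text
  simp only [is_medical_query, is_medical_query_alt, altKeywords_eq]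
  rw [scan_eq _ keywords_ne_nil]
  have hb : PySem.Chars.strip (PySem.Chars.lower text.toList)
      = (PySem.Str.strip (PySem.Str.lower text)).toList := by
    simp [pysem]
  rw [hb]
  simp [pysem, List.any_map, Function.comp]
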